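-- pv_equiv track=rewrite | github.com/Brxnni/AoC2016 | 02/main.py | part2
-- ===== SOURCE A (Python) =====
-- def part2(file: str) -> str:
-- 	keypad = [
-- 		["0","0","1","0","0"],
-- 		["0","2","3","4","0"],
-- 		["5","6","7","8","9"],
-- 		["0","A","B","C","0"],
-- 		["0","0","D","0","0"]
-- 	]
-- 	buttons = ""
-- 	# Coordinate system's (0, 0) is top left
-- 	coordinate = [0, 2]
-- 	for line in file.split("\n"):
-- 		# Loop through every direction
-- 		for direction in line:
-- 			match direction:
-- 				case "U":
-- 					# Normally you would put both inside one if statement,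
-- 					# but we need to check them in order to not crash
-- 					# Check if we are not on the total edge
-- 					if coordinate[1] > 0:
-- 						# Check if we would move to a "0"
-- 						if keypad[coordinate[1] - 1][coordinate[0]] != "0": coordinate[1] -= 1
-- 				case "R":
-- 					if coordinate[0] < 4:
-- 						if keypad[coordinate[1]][coordinate[0] + 1] != "0": coordinate[0] += 1
-- 				case "D":
-- 					if coordinate[1] < 4:
-- 						if keypad[coordinate[1] + 1][coordinate[0]] != "0": coordinate[1] += 1
-- 				case "L":
-- 					if coordinate[0] > 0:
-- 						if keypad[coordinate[1]][coordinate[0] - 1] != "0": coordinate[0] -= 1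
-- 		buttons += keypad[coordinate[1]][coordinate[0]]
-- 	return buttons
-- ===== SOURCE B (Python) =====
-- # Finite-state machine over button labels: the keypad is a precomputed
-- # transition table {(button, direction): next_button}; missing entries
-- # (walls, unknown characters) mean "stay".
-- _TRANS = {
--     ("1", "D"): "3",
--     ("2", "R"): "3", ("2", "D"): "6",
--     ("3", "U"): "1", ("3", "R"): "4", ("3", "D"): "7", ("3", "L"): "2",
--     ("4", "L"): "3", ("4", "D"): "8",
--     ("5", "R"): "6",
--     ("6", "U"): "2", ("6", "R"): "7", ("6", "D"): "A", ("6", "L"): "5",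
--     ("7", "U"): "3", ("7", "R"): "8", ("7", "D"): "B", ("7", "L"): "6",
--     ("8", "U"): "4", ("8", "R"): "9", ("8", "D"): "C", ("8", "L"): "7",
--     ("9", "L"): "8",
--     ("A", "U"): "6", ("A", "R"): "B",
--     ("B", "U"): "7", ("B", "R"): "C", ("B", "D"): "D", ("B", "L"): "A",
--     ("C", "U"): "8", ("C", "L"): "B",
--     ("D", "U"): "B",
-- }
--
-- def part2(file: str) -> str:
--     button = "5"
--     out = []
--     for line in file.split("\n"):
--         for ch in line:
--             button = _TRANS.get((button, ch), button)
--         out.append(button)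
--     return "".join(out)
-- ===== Notes on version B (the rewrite author's own statement) =====
-- stated objective: alternative
-- what changed: Replaced the 5x5 padded-grid coordinate simulation (tentative move + edge and blank-cell checks) by a finite-state machine directly over button labels: a precomputed (button, direction) -> next-button transition table where a missing entry (wall or unknown character) means stay.
import Mathlib
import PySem

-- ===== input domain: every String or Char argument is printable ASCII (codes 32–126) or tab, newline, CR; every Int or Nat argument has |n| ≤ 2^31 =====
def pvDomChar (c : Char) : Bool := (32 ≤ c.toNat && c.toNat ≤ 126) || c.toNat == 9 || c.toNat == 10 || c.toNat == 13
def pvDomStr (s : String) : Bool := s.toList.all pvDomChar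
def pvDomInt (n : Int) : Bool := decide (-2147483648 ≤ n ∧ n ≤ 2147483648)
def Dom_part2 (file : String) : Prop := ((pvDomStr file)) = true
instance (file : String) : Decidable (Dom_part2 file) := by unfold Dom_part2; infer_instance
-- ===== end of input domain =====

-- B replaces A's padded 5×5 grid simulation by a finite-state machine directly over button
-- labels with a precomputed (button, direction) → button transition table (objective: alternative).


-- ===== PORT A =====
-- Python's one-char strings in the keypad are ported as Char (labels and the '≠ "0"' tests
-- are all on single characters); 'buttons += …' accumulates a List Char, String.ofList at the end.
def pvKeypad : List (List Char) :=
  [['0','0','1','0','0'],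
   ['0','2','3','4','0'],
   ['5','6','7','8','9'],
   ['0','A','B','C','0'],
   ['0','0','D','0','0']]

-- keypad[y][x]; the .getD defaults are never reached: A's guards keep both indices in 0..4.
def pvKp (y x : Int) : Char :=
  (PySem.List.pyGet? ((PySem.List.pyGet? pvKeypad y).getD []) x).getD '0'

-- the match over one direction character, branches in A's order
def pvStepA (p : Int × Int) (c : Char) : Int × Int :=
  if c = 'U' then
    if p.2 > 0 then (if pvKp (p.2 - 1) p.1 ≠ '0' then (p.1, p.2 - 1) else p) else p
  else if c = 'R' then
    if p.1 < 4 then (if pvKp p.2 (p.1 + 1) ≠ '0' then (p.1 + 1, p.2) else p) else p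
  else if c = 'D' then
    if p.2 < 4 then (if pvKp (p.2 + 1) p.1 ≠ '0' then (p.1, p.2 + 1) else p) else p
  else if c = 'L' then
    if p.1 > 0 then (if pvKp p.2 (p.1 - 1) ≠ '0' then (p.1 - 1, p.2) else p) else p
  else p

-- one line of A's outer loop: run the directions, then append the current button
def pvLineA (st : List Char × (Int × Int)) (line : String) : List Char × (Int × Int) :=
  let pos := line.toList.foldl pvStepA st.2
  (st.1 ++ [pvKp pos.2 pos.1], pos)

def part2 (file : String) : String :=
  let r := ((PySem.Str.split? file "\n").getD []).foldl pvLineA ([], (0, 2))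
  String.ofList r.1

-- ===== PORT B =====
-- the transition table _TRANS, keyed by (button, direction)
def pvTrans : PySem.Dict (Char × Char) Char :=
  PySem.Dict.ofList
    [(('1', 'D'), '3'),
     (('2', 'R'), '3'), (('2', 'D'), '6'),
     (('3', 'U'), '1'), (('3', 'R'), '4'), (('3', 'D'), '7'), (('3', 'L'), '2'),
     (('4', 'L'), '3'), (('4', 'D'), '8'),
     (('5', 'R'), '6'),
     (('6', 'U'), '2'), (('6', 'R'), '7'), (('6', 'D'), 'A'), (('6', 'L'), '5'),
     (('7', 'U'), '3'), (('7', 'R'), '8'), (('7', 'D'), 'B'), (('7', 'L'), '6'),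
     (('8', 'U'), '4'), (('8', 'R'), '9'), (('8', 'D'), 'C'), (('8', 'L'), '7'),
     (('9', 'L'), '8'),
     (('A', 'U'), '6'), (('A', 'R'), 'B'),
     (('B', 'U'), '7'), (('B', 'R'), 'C'), (('B', 'D'), 'D'), (('B', 'L'), 'A'),
     (('C', 'U'), '8'), (('C', 'L'), 'B'),
     (('D', 'U'), 'B')]

-- _TRANS.get((button, ch), button): missing entry (wall or unknown char) = stay
def pvStepB (b : Char) (c : Char) : Char :=
  pvTrans.getD (b, c) b

-- one line of B's loop; '"".join(out)' over one-char strings = String.ofList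
def pvLineB (st : List Char × Char) (line : String) : List Char × Char :=
  let b := line.toList.foldl pvStepB st.2
  (st.1 ++ [b], b)

def part2_alt (file : String) : String :=
  let r := ((PySem.Str.split? file "\n").getD []).foldl pvLineB ([], '5')
  String.ofList r.1

-- ===== PRECONDITION & SPEC =====
def Spec_part2 (file : String) (out : String) : Prop := out = part2_alt file
instance (file : String) (out : String) : Decidable (Spec_part2 file out) := by unfold Spec_part2; infer_instance

-- ===== CLAIM (what is proved, stated in full; the proofs are below) =====
def Claim_equal_part2 : Prop := ∀ (file : String), Dom_part2 file → Spec_part2 file (part2 file)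

-- ===== LEMMAS AND PROOFS =====
-- the 13 valid grid coordinates (x, y) of A
def pvC13 : List (Int × Int) :=
  [(2, 0), (1, 1), (2, 1), (3, 1), (0, 2), (1, 2), (2, 2), (3, 2), (4, 2),
   (1, 3), (2, 3), (3, 3), (2, 4)]

-- one direction character: A's step stays on the keypad and B's FSM step tracks its label
lemma pv_step_step (p : Int × Int) (hp : p ∈ pvC13) (c : Char) :
    pvStepA p c ∈ pvC13 ∧
      pvStepB (pvKp p.2 p.1) c = pvKp (pvStepA p c).2 (pvStepA p c).1 := by
  by_cases hU : c = 'U'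
  · subst hU; fin_cases hp <;> exact ⟨by decide, by decide⟩
  by_cases hR : c = 'R'
  · subst hR; fin_cases hp <;> exact ⟨by decide, by decide⟩
  by_cases hD : c = 'D'
  · subst hD; fin_cases hp <;> exact ⟨by decide, by decide⟩
  by_cases hL : c = 'L'
  · subst hL; fin_cases hp <;> exact ⟨by decide, by decide⟩
  · have eU : ('U' == c) = false := by simp [Ne.symm hU]
    have eR : ('R' == c) = false := by simp [Ne.symm hR]
    have eD : ('D' == c) = false := by simp [Ne.symm hD]
    have eL : ('L' == c) = false := by simp [Ne.symm hL]
    have hmk : pvTrans = PySem.Dict.mk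
        [(('1', 'D'), '3'),
         (('2', 'R'), '3'), (('2', 'D'), '6'),
         (('3', 'U'), '1'), (('3', 'R'), '4'), (('3', 'D'), '7'), (('3', 'L'), '2'),
         (('4', 'L'), '3'), (('4', 'D'), '8'),
         (('5', 'R'), '6'),
         (('6', 'U'), '2'), (('6', 'R'), '7'), (('6', 'D'), 'A'), (('6', 'L'), '5'),
         (('7', 'U'), '3'), (('7', 'R'), '8'), (('7', 'D'), 'B'), (('7', 'L'), '6'),
         (('8', 'U'), '4'), (('8', 'R'), '9'), (('8', 'D'), 'C'), (('8', 'L'), '7'),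
         (('9', 'L'), '8'),
         (('A', 'U'), '6'), (('A', 'R'), 'B'),
         (('B', 'U'), '7'), (('B', 'R'), 'C'), (('B', 'D'), 'D'), (('B', 'L'), 'A'),
         (('C', 'U'), '8'), (('C', 'L'), 'B'),
         (('D', 'U'), 'B')] := by decide
    have hB : ∀ b : Char, pvStepB b c = b := by
      intro b
      have pe : ∀ (a d : Char), ((a, d) == (b, c)) = (a == b && d == c) := fun a d => rfl
      simp [pvStepB, hmk, PySem.Dict.getD, PySem.Dict.get?, List.find?, pe, eU, eR, eD, eL]
    have hA : pvStepA p c = p := by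
      simp [pvStepA, hU, hR, hD, hL]
    rw [hA, hB]
    exact ⟨hp, rfl⟩

-- a whole line of directions
lemma pv_fold_line (cs : List Char) : ∀ p ∈ pvC13,
    cs.foldl pvStepA p ∈ pvC13 ∧
      cs.foldl pvStepB (pvKp p.2 p.1) = pvKp (cs.foldl pvStepA p).2 (cs.foldl pvStepA p).1 := by
  induction cs with
  | nil => exact fun p hp => ⟨hp, rfl⟩
  | cons c cs ih =>
    intro p hp
    obtain ⟨h1, h2⟩ := pv_step_step p hp c
    simpa [List.foldl_cons, h2] using ih (pvStepA p c) h1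

-- the outer loop over lines
lemma pv_fold_lines (ls : List String) : ∀ (acc : List Char) (p : Int × Int), p ∈ pvC13 →
    (ls.foldl pvLineA (acc, p)).2 ∈ pvC13 ∧
      ls.foldl pvLineB (acc, pvKp p.2 p.1) =
        ((ls.foldl pvLineA (acc, p)).1,
         pvKp (ls.foldl pvLineA (acc, p)).2.2 (ls.foldl pvLineA (acc, p)).2.1) := by
  induction ls with
  | nil => exact fun acc p hp => ⟨hp, rfl⟩
  | cons l ls ih =>
    intro acc p hp
    obtain ⟨h1, h2⟩ := pv_fold_line l.toList p hp
    have hA : pvLineA (acc, p) l =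
        (acc ++ [pvKp (l.toList.foldl pvStepA p).2 (l.toList.foldl pvStepA p).1],
         l.toList.foldl pvStepA p) := by
      simp [pvLineA]
    have hB : pvLineB (acc, pvKp p.2 p.1) l =
        (acc ++ [pvKp (l.toList.foldl pvStepA p).2 (l.toList.foldl pvStepA p).1],
         pvKp (l.toList.foldl pvStepA p).2 (l.toList.foldl pvStepA p).1) := by
      simp [pvLineB, h2]
    simpa [List.foldl_cons, hA, hB] using ih _ (l.toList.foldl pvStepA p) h1

-- ===== VERDICT (by name: the statement is the Claim_ definition above) =====
theorem part2_spec : Claim_equal_part2 := by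
  intro file _
  unfold Spec_part2 part2 part2_alt
  have hstart : ((0 : Int), (2 : Int)) ∈ pvC13 := by decide
  obtain ⟨_, h⟩ := pv_fold_lines ((PySem.Str.split? file "\n").getD []) [] ((0 : Int), (2 : Int)) hstart
  have h5 : pvKp ((0 : Int), (2 : Int)).2 ((0 : Int), (2 : Int)).1 = '5' := by decide
  rw [h5] at h
  simp only []
  rw [h]
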